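-- pv_equiv track=rewrite | github.com/bioinfoUQAM/siWalk | src/parse_alignment_of_a_contig.py | get_updated_eff_pos
-- ===== SOURCE A (Python) =====
-- def get_updated_eff_pos (phased_positions, d_21nt_watson_pos_freq, d_21nt_crick_pos_freq, Dicer_relaxation):
--   tmp = {}
--   for i in phased_positions:
--     w, c, flag = 0, 0, 0
--     if i in d_21nt_watson_pos_freq.keys():
--       w = d_21nt_watson_pos_freq[i]
--       flag = 1
--     if i in d_21nt_crick_pos_freq.keys():
--       c = d_21nt_crick_pos_freq[i]
--       flag = 1
--     if flag == 1: flag = 0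
--     tmp[i] = w + c
--   pos_of_maxf_updated = max(tmp, key=tmp.get)
--   eff_strand_updated, eff_pos_updated, eff_frq_updated = get_effector_coordinate (pos_of_maxf_updated, d_21nt_watson_pos_freq, d_21nt_crick_pos_freq, Dicer_relaxation)
--   return pos_of_maxf_updated, eff_strand_updated, eff_pos_updated, eff_frq_updated
--
-- def _internal_eff_coor (d, pos, f):
--   ''' allow phase drift
--   @d: Watson or Crick pos:freq; due to my code design, need to process Watson and Crick separately
--   @p: position of the most abundant freq in d
--   @q: freq at p in d
--   '''
--   dres, p, q = {}, 0, 0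
--   for i in range(pos - f, pos + f + 1):
--     if i in d.keys(): dres[i] = d[i]
--   if len(dres.keys()) > 0:
--     p = max(dres, key=dres.get)
--     q = dres[p]
--   return p, q
--
-- def get_effector_coordinate (pos, d_21nt_watson_pos_freq, d_21nt_crick_pos_freq, Dicer_relaxation):
--   ''' true coordinate, suitable to sequence retrival
--   @p: position of the most abundant freq near pos
--   @q: freq at p
--   @s: strand of the most abundant freq at p
--   '''
--   p, q = _internal_eff_coor (d_21nt_watson_pos_freq, pos, Dicer_relaxation)
--   p2, q2 = _internal_eff_coor (d_21nt_crick_pos_freq, pos, Dicer_relaxation)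
--   if q > q2: s = 'W'
--   elif q == q2: s = 'B'
--   else: s, p, q = 'C', p2-2, q2
--   return s, p, q
-- ===== SOURCE B (Python) =====
-- def _rank_window(d, pos, f):
--     # in-window entries of d taken from the dict's items, ordered by position and then
--     # stably re-ranked by descending frequency: the head is the highest-frequency entry,
--     # smallest position winning ties
--     by_pos = sorted((kv for kv in d.items() if pos - f <= kv[0] <= pos + f),
--                     key=lambda kv: kv[0])
--     order = sorted(by_pos, key=lambda kv: -kv[1])
--     if not order:
--         return (0, 0)
--     return order[0]
--
-- def get_updated_eff_pos(phased_positions, d_21nt_watson_pos_freq, d_21nt_crick_pos_freq, Dicer_relaxation):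
--     # rank the phased positions by descending combined frequency; stability of sorted
--     # keeps the earliest occurrence first among ties, so the head is A's argmax
--     order = sorted(enumerate(phased_positions),
--                    key=lambda t: -(d_21nt_watson_pos_freq.get(t[1], 0) + d_21nt_crick_pos_freq.get(t[1], 0)))
--     pos = order[0][1]
--     p, q = _rank_window(d_21nt_watson_pos_freq, pos, Dicer_relaxation)
--     p2, q2 = _rank_window(d_21nt_crick_pos_freq, pos, Dicer_relaxation)
--     if q > q2:
--         return pos, 'W', p, q
--     if q == q2:
--         return pos, 'B', p, q
--     return pos, 'C', p2 - 2, q2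
-- ===== Notes on version B (the rewrite author's own statement) =====
-- stated objective: alternative
-- what changed: A builds a temporary position->frequency dict and takes max(dict, key=dict.get), and scans the whole Dicer window range rebuilding a second dict per strand; B instead ranks candidates by sorting - a stable sort of enumerate(phased_positions) by descending combined frequency whose head is the winner, and per strand a sort of the dict's own in-window items by position then stably by descending frequency - so no temporary dicts, no range scan and no flag logic remain.
import Mathlib
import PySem

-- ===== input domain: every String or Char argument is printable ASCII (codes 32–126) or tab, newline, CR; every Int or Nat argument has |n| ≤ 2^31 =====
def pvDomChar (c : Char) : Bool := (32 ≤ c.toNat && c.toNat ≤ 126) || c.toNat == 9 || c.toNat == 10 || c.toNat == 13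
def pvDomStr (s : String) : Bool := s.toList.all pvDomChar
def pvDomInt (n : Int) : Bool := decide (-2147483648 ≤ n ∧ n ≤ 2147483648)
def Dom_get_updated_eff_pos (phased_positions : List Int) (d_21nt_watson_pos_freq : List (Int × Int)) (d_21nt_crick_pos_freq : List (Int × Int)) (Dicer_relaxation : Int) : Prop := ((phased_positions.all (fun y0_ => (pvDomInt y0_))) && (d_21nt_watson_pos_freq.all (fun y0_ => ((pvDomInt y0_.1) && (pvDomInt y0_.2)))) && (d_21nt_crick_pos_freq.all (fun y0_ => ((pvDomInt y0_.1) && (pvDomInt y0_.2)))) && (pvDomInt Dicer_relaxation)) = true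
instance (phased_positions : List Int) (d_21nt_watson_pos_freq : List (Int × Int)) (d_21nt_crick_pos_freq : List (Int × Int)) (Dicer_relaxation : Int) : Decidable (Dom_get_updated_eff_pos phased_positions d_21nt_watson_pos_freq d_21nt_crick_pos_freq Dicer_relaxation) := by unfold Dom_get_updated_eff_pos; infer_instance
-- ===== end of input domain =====

-- B ranks candidates by sorting (stable sort over enumerate / over the dict's in-window items,
-- head = winner) instead of A's temporary-dict-then-max(dict, key=dict.get) passes and range scan
-- (objective: alternative); return values proved equal on nonempty phased_positions with
-- duplicate-free association lists for the two dict parameters.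


-- ===== PORT A =====
-- _internal_eff_coor: build dres from the window, then p = max(dres, key=dres.get), q = dres[p].
-- key=dres.get is ported as getD _ 0 (every key queried is present, so the value is the same);
-- dres[p] with p ∈ dres likewise.
def pvInternalEffCoor (d : PySem.Dict Int Int) (pos : Int) (f : Int) : Int × Int :=
  let dres := (PySem.List.pyRange (pos - f) (pos + f + 1) 1).foldl
    (fun dres i => if d.contains i then dres.insert i ((d.get? i).getD 0) else dres)
    PySem.Dict.empty
  if 0 < dres.keys.length then
    let p := (PySem.List.max? dres.keys (fun k => dres.getD k 0)).getD 0
    (p, dres.getD p 0)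
  else (0, 0)

def pvGetEffectorCoordinate (pos : Int) (dw : PySem.Dict Int Int) (dc : PySem.Dict Int Int) (f : Int) : String × Int × Int :=
  let pq := pvInternalEffCoor dw pos f
  let pq2 := pvInternalEffCoor dc pos f
  if pq.2 > pq2.2 then ("W", pq.1, pq.2)
  else if pq.2 == pq2.2 then ("B", pq.1, pq.2)
  else ("C", pq2.1 - 2, pq2.2)

def get_updated_eff_pos (phased_positions : List Int) (d_21nt_watson_pos_freq : List (Int × Int)) (d_21nt_crick_pos_freq : List (Int × Int)) (Dicer_relaxation : Int) : Int × String × Int × Int :=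
  let dw := PySem.Dict.mk d_21nt_watson_pos_freq
  let dc := PySem.Dict.mk d_21nt_crick_pos_freq
  let tmp := phased_positions.foldl
    (fun tmp i =>
      -- w, c, flag = 0, 0, 0; the flag is set and immediately cleared, it has no effect
      let w : Int := if dw.contains i then (dw.get? i).getD 0 else 0
      let c : Int := if dc.contains i then (dc.get? i).getD 0 else 0
      tmp.insert i (w + c))
    PySem.Dict.empty
  -- max(tmp, key=tmp.get): first key with maximal value; raises ValueError on empty tmp,
  -- excluded by Pre_ (the .getD 0 fallback is never reached inside Pre_)
  let pos := (PySem.List.max? tmp.keys (fun k => tmp.getD k 0)).getD 0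
  let spq := pvGetEffectorCoordinate pos dw dc Dicer_relaxation
  (pos, spq.1, spq.2.1, spq.2.2)

-- ===== PORT B =====
-- _rank_window: the dict's in-window items sorted by position, stably re-sorted by descending
-- frequency; head is the winner ((0,0) when the window is empty)
def pvRankWindow (d : PySem.Dict Int Int) (pos f : Int) : Int × Int :=
  let byPos := PySem.List.sorted
    (d.items.filter (fun kv => decide (pos - f ≤ kv.1) && decide (kv.1 ≤ pos + f)))
    (fun kv => kv.1) false
  let order := PySem.List.sorted byPos (fun kv => -kv.2) false
  -- 'if not order: return (0, 0); return order[0]'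
  order.head?.getD (0, 0)

def get_updated_eff_pos_alt (phased_positions : List Int) (d_21nt_watson_pos_freq : List (Int × Int)) (d_21nt_crick_pos_freq : List (Int × Int)) (Dicer_relaxation : Int) : Int × String × Int × Int :=
  let dw := PySem.Dict.mk d_21nt_watson_pos_freq
  let dc := PySem.Dict.mk d_21nt_crick_pos_freq
  -- sorted(enumerate(...), key=-combined frequency); order[0][1] raises IndexError on the
  -- empty list, excluded by Pre_ (pyGetD's default is never reached inside Pre_)
  let order := PySem.List.sorted (PySem.List.enumerate phased_positions 0)
    (fun t => -(dw.getD t.2 0 + dc.getD t.2 0)) false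
  let pos := (PySem.List.pyGetD order 0 ((0 : Int), (0 : Int))).2
  let pq := pvRankWindow dw pos Dicer_relaxation
  let pq2 := pvRankWindow dc pos Dicer_relaxation
  if pq.2 > pq2.2 then (pos, "W", pq.1, pq.2)
  else if pq.2 == pq2.2 then (pos, "B", pq.1, pq.2)
  else (pos, "C", pq2.1 - 2, pq2.2)

-- ===== PRECONDITION & SPEC =====
-- On phased_positions = [] both Pythons raise (A: ValueError from max(), B: IndexError); the
-- duplicate-free conditions on the two association lists only restate that those parameters
-- are Python dicts, whose key lists never contain duplicates — no Python-reachable input is excluded.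
def Pre_get_updated_eff_pos (phased_positions : List Int) (d_21nt_watson_pos_freq : List (Int × Int)) (d_21nt_crick_pos_freq : List (Int × Int)) (Dicer_relaxation : Int) : Prop :=
  phased_positions ≠ [] ∧ (d_21nt_watson_pos_freq.map Prod.fst).Nodup ∧ (d_21nt_crick_pos_freq.map Prod.fst).Nodup
instance (phased_positions : List Int) (d_21nt_watson_pos_freq : List (Int × Int)) (d_21nt_crick_pos_freq : List (Int × Int)) (Dicer_relaxation : Int) : Decidable (Pre_get_updated_eff_pos phased_positions d_21nt_watson_pos_freq d_21nt_crick_pos_freq Dicer_relaxation) := by unfold Pre_get_updated_eff_pos; infer_instance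
def pvWitness_get_updated_eff_pos : List Int × (List (Int × Int)) × (List (Int × Int)) × Int := ([21, 42], [(21, 3), (45, 1)], [(42, 2)], 2)
def Spec_get_updated_eff_pos (phased_positions : List Int) (d_21nt_watson_pos_freq : List (Int × Int)) (d_21nt_crick_pos_freq : List (Int × Int)) (Dicer_relaxation : Int) (out : Int × String × Int × Int) : Prop := out = get_updated_eff_pos_alt phased_positions d_21nt_watson_pos_freq d_21nt_crick_pos_freq Dicer_relaxation
instance (phased_positions : List Int) (d_21nt_watson_pos_freq : List (Int × Int)) (d_21nt_crick_pos_freq : List (Int × Int)) (Dicer_relaxation : Int) (out : Int × String × Int × Int) : Decidable (Spec_get_updated_eff_pos phased_positions d_21nt_watson_pos_freq d_21nt_crick_pos_freq Dicer_relaxation out) := by unfold Spec_get_updated_eff_pos; infer_instance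

-- ===== CLAIM (what is proved, stated in full; the proofs are below) =====
def Claim_equal_get_updated_eff_pos : Prop := ∀ (phased_positions : List Int) (d_21nt_watson_pos_freq : List (Int × Int)) (d_21nt_crick_pos_freq : List (Int × Int)) (Dicer_relaxation : Int), Dom_get_updated_eff_pos phased_positions d_21nt_watson_pos_freq d_21nt_crick_pos_freq Dicer_relaxation → Pre_get_updated_eff_pos phased_positions d_21nt_watson_pos_freq d_21nt_crick_pos_freq Dicer_relaxation → Spec_get_updated_eff_pos phased_positions d_21nt_watson_pos_freq d_21nt_crick_pos_freq Dicer_relaxation (get_updated_eff_pos phased_positions d_21nt_watson_pos_freq d_21nt_crick_pos_freq Dicer_relaxation)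

-- ===== LEMMAS AND PROOFS =====

-- the step of max(xs, key=g) (= PySem.List.max?'s fold), of the stable-sort head on value
-- pairs, and the pair-valued running best
def pvMstep (g : Int → Int) : Option Int → Int → Option Int :=
  fun a x => match a with
  | none => some x
  | some m => if g m < g x then some x else some m

def pvNstep (g : Int → Int) : Option (Int × Int) → (Int × Int) → Option (Int × Int) :=
  fun a x => match a with
  | none => some x
  | some m => if g m.2 < g x.2 then some x else some m

def pvPstep (g : Int → Int) : Option (Int × Int) → Int → Option (Int × Int) :=
  fun b i => match b with
  | none => some (i, g i)
  | some b => if g i > b.2 then some (i, g i) else some b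

theorem pvMax?_eq_foldl (xs : List Int) (g : Int → Int) :
    PySem.List.max? xs g = xs.foldl (pvMstep g) none := by
  unfold PySem.List.max?
  apply List.foldl_ext
  intro a x _
  cases a <;> rfl

theorem pvPair_foldl (g : Int → Int) (l : List Int) (a : Option Int) :
    l.foldl (pvPstep g) (a.map (fun m => (m, g m))) =
      (l.foldl (pvMstep g) a).map (fun m => (m, g m)) := by
  induction l generalizing a with
  | nil => rfl
  | cons x t ih =>
    cases a with
    | none => simpa [pvPstep, pvMstep] using ih (some x)
    | some m =>
      by_cases h : g m < g x
      · simpa [pvPstep, pvMstep, h] using ih (some x)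
      · simpa [pvPstep, pvMstep, h] using ih (some m)

-- head of Python's stable sort = the first element with minimal key (the running first-min)
theorem pvHeadSorted {α κ : Type} [LinearOrder κ] (xs : List α) (key : α → κ) :
    (PySem.List.sorted xs key false).head? =
      xs.foldl (fun a x => match a with
        | none => some x
        | some m => if key x < key m then some x else some m) none := by
  induction xs using List.reverseRecOn with
  | nil => rfl
  | append_singleton xs x ih =>
    rw [PySem.List.sorted_eq_foldl_insertBy] at ih ⊢
    rw [List.foldl_append, List.foldl_append]
    simp only [List.foldl_cons, List.foldl_nil]
    cases hL : List.foldl (fun acc x => PySem.List.insertBy (fun a b => decide (key a < key b)) x acc) [] xs with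
    | nil =>
      rw [hL] at ih
      simp only [List.head?_nil] at ih
      rw [← ih]
      simp [PySem.List.insertBy]
    | cons y t =>
      rw [hL] at ih
      simp only [List.head?_cons] at ih
      rw [← ih]
      by_cases h : key x < key y
      · simp [PySem.List.insertBy, h]
      · simp [PySem.List.insertBy, h]

theorem pvHeadSortedSnd (l : List (Int × Int)) :
    (PySem.List.sorted l (fun kv => -kv.2) false).head? = l.foldl (pvNstep (fun v => v)) none := by
  rw [pvHeadSorted]
  apply List.foldl_ext
  intro a x _
  cases a with
  | none => rfl
  | some m => simp [pvNstep, neg_lt_neg_iff]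

theorem pvHeadSortedKey (g : Int → Int) (l : List (Int × Int)) :
    (PySem.List.sorted l (fun t => -(g t.2)) false).head? = l.foldl (pvNstep g) none := by
  rw [pvHeadSorted]
  apply List.foldl_ext
  intro a x _
  cases a with
  | none => rfl
  | some m => simp [pvNstep, neg_lt_neg_iff]

-- projecting the pair-valued first-min onto its second component
theorem pvProj (g : Int → Int) (l : List (Int × Int)) (a : Option (Int × Int)) :
    (l.foldl (pvNstep g) a).map (fun p => p.2) =
      (l.map (fun p => p.2)).foldl (pvMstep g) (a.map (fun p => p.2)) := by
  induction l generalizing a with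
  | nil => rfl
  | cons x t ih =>
    cases a with
    | none => simpa [pvNstep, pvMstep] using ih (some x)
    | some m =>
      by_cases h : g m.2 < g x.2
      · simpa [pvNstep, pvMstep, h] using ih (some x)
      · simpa [pvNstep, pvMstep, h] using ih (some m)

-- the pair-valued first-min over (k, g k) pairs is the running best over the keys
theorem pvNstep_map (g : Int → Int) (ks : List Int) :
    (ks.map (fun k => (k, g k))).foldl (pvNstep (fun v => v)) none = ks.foldl (pvPstep g) none := by
  rw [List.foldl_map]
  apply List.foldl_ext
  intro a k _
  cases a with
  | none => rfl
  | some b => simp [pvNstep, pvPstep, gt_iff_lt]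

theorem pvMfold_spec (g : Int → Int) (xs : List Int) (a : Option Int) (m : Int)
    (h : xs.foldl (pvMstep g) a = some m) :
    (a = some m ∨ m ∈ xs) ∧ (∀ y ∈ xs, g y ≤ g m) ∧ (∀ m0, a = some m0 → g m0 ≤ g m) := by
  induction xs generalizing a with
  | nil => simp_all
  | cons x t ih =>
    cases a with
    | none =>
      obtain ⟨h1, h2, h3⟩ := ih (some x) h
      refine ⟨?_, ?_, by simp⟩
      · rcases h1 with h1 | h1
        · exact Or.inr (by have hx1 := Option.some_inj.mp h1; simp [hx1])
        · exact Or.inr (by simp [h1])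
      · intro y hy
        rcases List.mem_cons.mp hy with rfl | hy
        · exact h3 y rfl
        · exact h2 y hy
    | some m0 =>
      by_cases hc : g m0 < g x
      · obtain ⟨h1, h2, h3⟩ := ih (some x) (by simpa [pvMstep, hc] using h)
        have hxm : g x ≤ g m := h3 x rfl
        refine ⟨?_, ?_, ?_⟩
        · rcases h1 with h1 | h1
          · exact Or.inr (by have hx1 := Option.some_inj.mp h1; simp [hx1])
          · exact Or.inr (by simp [h1])
        · intro y hy
          rcases List.mem_cons.mp hy with rfl | hy
          · exact hxm
          · exact h2 y hy
        · rintro m1 h1; cases h1; exact le_trans (le_of_lt hc) hxm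
      · obtain ⟨h1, h2, h3⟩ := ih (some m0) (by simpa [pvMstep, hc] using h)
        have hm0 : g m0 ≤ g m := h3 m0 rfl
        refine ⟨?_, ?_, ?_⟩
        · rcases h1 with h1 | h1
          · exact Or.inl h1
          · exact Or.inr (by simp [h1])
        · intro y hy
          rcases List.mem_cons.mp hy with rfl | hy
          · exact le_trans (not_lt.mp hc) hm0
          · exact h2 y hy
        · rintro m1 h1; cases h1; exact hm0

theorem pvMfold_some (g : Int → Int) (xs : List Int) (m : Int) :
    ∃ m', xs.foldl (pvMstep g) (some m) = some m' := by
  induction xs generalizing m with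
  | nil => exact ⟨m, rfl⟩
  | cons x t ih =>
    by_cases h : g m < g x
    · simpa [pvMstep, h] using ih x
    · simpa [pvMstep, h] using ih m

theorem pvMfold_none (g : Int → Int) (xs : List Int)
    (h : xs.foldl (pvMstep g) none = none) : xs = [] := by
  cases xs with
  | nil => rfl
  | cons a t =>
    obtain ⟨m', hm'⟩ := pvMfold_some g t a
    simp only [List.foldl_cons] at h
    rw [show pvMstep g none a = some a from rfl] at h
    exact absurd (hm'.symm.trans h) (by simp)

theorem pvGetD_insert_fold (g : Int → Int) (l : List Int) (d : PySem.Dict Int Int) (k : Int) :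
    (l.foldl (fun t i => t.insert i (g i)) d).getD k 0 = if k ∈ l then g k else d.getD k 0 := by
  induction l generalizing d with
  | nil => simp
  | cons i t ih =>
    simp only [List.foldl_cons, ih, PySem.Dict.getD_insert, List.mem_cons]
    by_cases h1 : k ∈ t <;> by_cases h2 : k = i <;> simp [h1, h2]

theorem pvContains_insert_fold (g : Int → Int) (l : List Int) (d : PySem.Dict Int Int) (k : Int) :
    (l.foldl (fun t i => t.insert i (g i)) d).contains k = (decide (k ∈ l) || d.contains k) := by
  induction l generalizing d with
  | nil => simp
  | cons i t ih =>
    simp only [List.foldl_cons, ih, PySem.Dict.contains_insert, List.mem_cons]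
    by_cases h1 : k ∈ t <;> by_cases h2 : k = i <;> simp [h1, h2]

theorem pvInsert_fold_mem (g : Int → Int) (l : List Int) (x : Int)
    (hx : x ∈ l) :
    (l.foldl (fun t i => t.insert i (g i)) PySem.Dict.empty).insert x (g x)
      = l.foldl (fun t i => t.insert i (g i)) PySem.Dict.empty := by
  set T := l.foldl (fun t i => t.insert i (g i)) PySem.Dict.empty with hT
  have hnd : T.keys.Nodup := PySem.Dict.nodup_keys_foldl_insert l _ _ (by simp)
  have hc : T.contains x = true := by
    rw [hT, pvContains_insert_fold]; simp [hx]
  apply PySem.Dict.ext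
  rw [PySem.Dict.items_insert_of_contains T (g x) hc]
  have : ∀ p ∈ T.items, (if p.1 == x then (x, g x) else p) = p := by
    rintro ⟨k, v⟩ hp
    by_cases hk : k = x
    · subst hk
      have hv : T.getD k 0 = v := PySem.Dict.getD_of_mem_items T hp hnd 0
      rw [hT, pvGetD_insert_fold] at hv
      simp only [hx, if_true] at hv
      simp [hv]
    · simp [hk]
  calc T.items.map (fun p => if p.1 == x then (x, g x) else p)
      = T.items.map id := List.map_congr_left (by simpa using this)
    _ = T.items := List.map_id _

theorem pvMstep_congr (g g' : Int → Int) (xs : List Int) (a : Option Int)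
    (hxs : ∀ x ∈ xs, g x = g' x) (ha : ∀ m, a = some m → g m = g' m) :
    xs.foldl (pvMstep g) a = xs.foldl (pvMstep g') a := by
  induction xs generalizing a with
  | nil => rfl
  | cons x t ih =>
    have hx : g x = g' x := hxs x (by simp)
    have ht : ∀ y ∈ t, g y = g' y := fun y hy => hxs y (by simp [hy])
    cases a with
    | none =>
      simp only [List.foldl_cons, pvMstep]
      exact ih (some x) ht (by rintro m rfl2; simp_all)
    | some m =>
      have hm : g m = g' m := ha m rfl
      simp only [List.foldl_cons, pvMstep, hm, hx]
      split
      · exact ih (some x) ht (by rintro m' h'; cases h'; exact hx)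
      · exact ih (some m) ht (by rintro m' h'; cases h'; exact hm)

-- A's build-dict-then-max equals the one-pass running best, for any value function g
theorem pvMaxDict (g : Int → Int) (l : List Int) :
    PySem.List.max? ((l.foldl (fun t i => t.insert i (g i)) PySem.Dict.empty).keys)
      (fun k => (l.foldl (fun t i => t.insert i (g i)) PySem.Dict.empty).getD k 0)
    = l.foldl (pvMstep g) none := by
  induction l using List.reverseRecOn with
  | nil => rfl
  | append_singleton l x ih =>
    set T := l.foldl (fun t i => t.insert i (g i)) PySem.Dict.empty with hT
    have hfold : (l ++ [x]).foldl (fun t i => t.insert i (g i)) PySem.Dict.empty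
        = T.insert x (g x) := by rw [List.foldl_append]; rfl
    have hkeymem : ∀ k, T.contains k = true → k ∈ l := by
      intro k hk; rw [hT, pvContains_insert_fold] at hk; simpa using hk
    by_cases hx : T.contains x = true
    · have hxl : x ∈ l := hkeymem x hx
      have hins : T.insert x (g x) = T := by rw [hT]; exact pvInsert_fold_mem g l x hxl
      rw [hfold, hins, ih, List.foldl_append]
      cases hr : l.foldl (pvMstep g) none with
      | none =>
        exfalso
        rw [pvMfold_none g l hr] at hxl
        simp at hxl
      | some m =>
        have hle : g x ≤ g m := (pvMfold_spec g l none m hr).2.1 x hxl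
        simp [List.foldl_cons, pvMstep, not_lt.mpr hle]
    · have hxl : x ∉ l := fun h => hx (by rw [hT, pvContains_insert_fold]; simp [h])
      have hkeys : (T.insert x (g x)).keys = T.keys ++ [x] :=
        PySem.Dict.keys_insert_of_not_contains T (g x) (by simpa using hx)
      rw [hfold, hkeys, pvMax?_eq_foldl, List.foldl_append]
      have hcongr : T.keys.foldl (pvMstep (fun k => (T.insert x (g x)).getD k 0)) none
          = T.keys.foldl (pvMstep (fun k => T.getD k 0)) none := by
        apply pvMstep_congr
        · intro k hk
          have hkl : k ∈ l := hkeymem k ((PySem.Dict.contains_iff_mem_keys T k).mpr hk)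
          have hne : k ≠ x := fun h => hxl (h ▸ hkl)
          exact PySem.Dict.getD_insert_of_ne _ _ _ hne
        · intro m h; exact absurd h (by simp)
      rw [hcongr, ← pvMax?_eq_foldl, ih]
      have hgx : (T.insert x (g x)).getD x 0 = g x := PySem.Dict.getD_insert_self T x (g x) 0
      cases hr : l.foldl (pvMstep g) none with
      | none => simp [hr, pvMstep]
      | some m =>
        have hml : m ∈ l := by
          rcases (pvMfold_spec g l none m hr).1 with h | h
          · exact absurd h (by simp)
          · exact h
        have hmx : m ≠ x := fun h => hxl (h ▸ hml)
        have hgm : (T.insert x (g x)).getD m 0 = g m := by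
          rw [PySem.Dict.getD_insert_of_ne _ _ _ hmx, hT, pvGetD_insert_fold]
          simp [hml]
        simp [hr, pvMstep, hgx, hgm]

-- A's window computation as a running best over the contained window positions
theorem pvInternal_eq_fold (d : PySem.Dict Int Int) (pos f : Int) :
    pvInternalEffCoor d pos f =
      (((PySem.List.pyRange (pos - f) (pos + f + 1) 1).filter (fun i => d.contains i)).foldl
        (pvPstep (fun k => d.getD k 0)) none).getD (0, 0) := by
  unfold pvInternalEffCoor
  simp only []
  set r := PySem.List.pyRange (pos - f) (pos + f + 1) 1 with hr
  set g : Int → Int := fun i => d.getD i 0 with hg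
  set ks := r.filter (fun i => d.contains i) with hks
  have hA : r.foldl (fun dres i => if d.contains i then dres.insert i ((d.get? i).getD 0) else dres)
        PySem.Dict.empty
      = ks.foldl (fun t i => t.insert i (g i)) PySem.Dict.empty := by
    rw [hks, List.foldl_filter]
    apply List.foldl_ext
    intro t i _
    by_cases h : d.contains i = true
    · simp [h, hg, PySem.Dict.getD_eq_get?_getD]
    · simp [h]
  rw [hA]
  have hpair := pvPair_foldl g ks none
  simp only [Option.map_none] at hpair
  rw [hpair, pvMaxDict g ks]
  cases hm : ks.foldl (pvMstep g) none with
  | none =>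
    have hnil : ks = [] := pvMfold_none g ks hm
    simp [hnil]
  | some m =>
    have hmem : m ∈ ks := by
      rcases (pvMfold_spec g ks none m hm).1 with h | h
      · exact absurd h (by simp)
      · exact h
    have hkeysne : 0 < ((ks.foldl (fun t i => t.insert i (g i)) PySem.Dict.empty).keys).length := by
      have hcm : (ks.foldl (fun t i => t.insert i (g i)) PySem.Dict.empty).contains m = true := by
        rw [pvContains_insert_fold]; simp [hmem]
      have hmk := (PySem.Dict.contains_iff_mem_keys _ m).mp hcm
      exact List.length_pos_of_mem hmk
    have hq : (ks.foldl (fun t i => t.insert i (g i)) PySem.Dict.empty).getD m 0 = g m := by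
      rw [pvGetD_insert_fold]; simp [hmem]
    simp [hkeysne, hq]

-- B's position-sorted in-window items ARE the contained window positions, in increasing order
theorem pvByPos_eq (d : PySem.Dict Int Int) (hnd : d.keys.Nodup) (pos f : Int) :
    PySem.List.sorted
      (d.items.filter (fun kv => decide (pos - f ≤ kv.1) && decide (kv.1 ≤ pos + f)))
      (fun kv => kv.1) false
    = ((PySem.List.pyRange (pos - f) (pos + f + 1) 1).filter (fun i => d.contains i)).map
        (fun k => (k, d.getD k 0)) := by
  set ks := (PySem.List.pyRange (pos - f) (pos + f + 1) 1).filter (fun i => d.contains i) with hks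
  apply PySem.List.sorted_eq_of_perm_of_pairwise_lt
  · rw [PySem.Dict.items_eq_map_keys d hnd 0, List.filter_map]
    apply List.Perm.map
    rw [List.perm_ext_iff_of_nodup (by rw [hks]; exact (PySem.List.nodup_pyRange_one _ _).filter _)
      (hnd.filter _)]
    intro k
    simp only [hks, List.mem_filter, PySem.List.mem_pyRange_one, Function.comp,
      PySem.Dict.contains_iff_mem_keys, Bool.and_eq_true, decide_eq_true_eq]
    constructor
    · rintro ⟨⟨h1, h2⟩, h3⟩; exact ⟨h3, by omega, by omega⟩
    · rintro ⟨h3, h1, h2⟩; exact ⟨⟨h1, by omega⟩, h3⟩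
  · rw [List.pairwise_map]
    exact (PySem.List.pairwise_lt_pyRange_one _ _).filter _

-- the two window scans agree
theorem pvWindow_eq (d : PySem.Dict Int Int) (hnd : d.keys.Nodup) (pos f : Int) :
    pvInternalEffCoor d pos f = pvRankWindow d pos f := by
  rw [pvInternal_eq_fold]
  unfold pvRankWindow
  simp only []
  rw [pvByPos_eq d hnd pos f, pvHeadSortedSnd, pvNstep_map]

-- ===== VERDICT (by name: the statement is the Claim_ definition above) =====
theorem get_updated_eff_pos_spec : Claim_equal_get_updated_eff_pos := by
  intro pp wl cl f _hDom hPre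
  obtain ⟨hne, hwnd, hcnd⟩ := hPre
  unfold Spec_get_updated_eff_pos get_updated_eff_pos get_updated_eff_pos_alt
    pvGetEffectorCoordinate
  simp only []
  set dw := PySem.Dict.mk wl with hdw
  set dc := PySem.Dict.mk cl with hdc
  have hndw : dw.keys.Nodup := by
    rw [hdw]; simpa [PySem.Dict.keys] using hwnd
  have hndc : dc.keys.Nodup := by
    rw [hdc]; simpa [PySem.Dict.keys] using hcnd
  set score : Int → Int := fun i => dw.getD i 0 + dc.getD i 0 with hscore
  -- A's tmp-building lambda writes score i at key i
  have hA : pp.foldl (fun tmp i =>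
        let w : Int := if dw.contains i then (dw.get? i).getD 0 else 0
        let c : Int := if dc.contains i then (dc.get? i).getD 0 else 0
        tmp.insert i (w + c)) PySem.Dict.empty
      = pp.foldl (fun t i => t.insert i (score i)) PySem.Dict.empty := by
    apply List.foldl_ext
    intro t i _
    have hw : (if dw.contains i then (dw.get? i).getD 0 else 0) = dw.getD i 0 := by
      by_cases h : dw.contains i = true
      · simp [h, PySem.Dict.getD_eq_get?_getD]
      · rw [if_neg (by simp [h]), PySem.Dict.getD_of_not_contains _ 0 (by simpa using h)]
    have hc : (if dc.contains i then (dc.get? i).getD 0 else 0) = dc.getD i 0 := by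
      by_cases h : dc.contains i = true
      · simp [h, PySem.Dict.getD_eq_get?_getD]
      · rw [if_neg (by simp [h]), PySem.Dict.getD_of_not_contains _ 0 (by simpa using h)]
    simp [hw, hc, hscore]
  rw [hA, pvMaxDict score pp]
  -- B's sorted-enumerate head is the same running best, via the snd-projection
  have hkey : (fun t : Int × Int => -(dw.getD t.2 0 + dc.getD t.2 0))
      = fun t : Int × Int => -(score t.2) := rfl
  rw [hkey, PySem.List.pyGetD_zero]
  have hBpos : ((PySem.List.sorted (PySem.List.enumerate pp 0)
        (fun t => -(score t.2)) false).getD 0 ((0 : Int), (0 : Int))).2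
      = (pp.foldl (pvMstep score) none).getD 0 := by
    have h1 : ∀ (l : List (Int × Int)),
        (l.getD 0 ((0 : Int), (0 : Int))).2 = ((l.head?.map (fun p => p.2)).getD 0) := by
      intro l; cases l <;> rfl
    rw [h1, pvHeadSortedKey score, pvProj score, PySem.List.map_snd_enumerate]
    rfl
  rw [hBpos]
  set pos := (pp.foldl (pvMstep score) none).getD 0
  rw [pvWindow_eq dw hndw pos f, pvWindow_eq dc hndc pos f]
  set pq := pvRankWindow dw pos f
  set pq2 := pvRankWindow dc pos f
  by_cases h1 : pq.2 > pq2.2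
  · simp [h1]
  · by_cases h3 : pq.2 = pq2.2
    · simp [h3]
    · simp [h1, h3]
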